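-- pv_equiv track=rewrite | github.com/fimpro/biopython | operacje_chemiczne.py | rozklad_na_bialka
-- ===== SOURCE A (Python) =====
-- def rozklad_na_bialka(lanc): #funkcja przyjmująca łańcuch kodonów, a zwracająca kandydatów na białka w tablicy
--     bialka=[]
--
--     j=0
--     czy_bialko=False #czy mamy zapisywać kodony
--     czy_skonczone=True #żeby białko się zapisało musi kończyć się kodonem stop
--     for i in lanc: #for który każdy kodon podłacza do danego białka
--         if (i == "*" and czy_bialko): #kodony stop oznaczone są w biopythonie *
--             czy_bialko = False
--             czy_skonczone = True
--             j += 1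
--         if czy_bialko:
--             bialka[j] = bialka[j] + i
--         elif(i=="M"):
--             bialka.append("M")
--             czy_bialko=True
--             czy_skonczone=False
--     if(not(czy_skonczone)):
--         bialka.pop()
--     return bialka
-- ===== SOURCE B (Python) =====
-- def rozklad_na_bialka(lanc):
--     # Two staged passes: split the chain at stop codons, drop the unterminated
--     # tail segment, and keep each remaining segment from its first 'M' on.
--     return [seg[seg.find("M"):] for seg in lanc.split("*")[:-1] if "M" in seg]
-- ===== Notes on version B (the rewrite author's own statement) =====
-- stated objective: simpler
-- what changed: Replaces A's one-pass index+two-flags state machine (optimistic append, final pop) by two staged passes: split the chain at stop codons, drop the unterminated last segment, and keep each remaining segment from its first start codon on (one comprehension line).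
import Mathlib
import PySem

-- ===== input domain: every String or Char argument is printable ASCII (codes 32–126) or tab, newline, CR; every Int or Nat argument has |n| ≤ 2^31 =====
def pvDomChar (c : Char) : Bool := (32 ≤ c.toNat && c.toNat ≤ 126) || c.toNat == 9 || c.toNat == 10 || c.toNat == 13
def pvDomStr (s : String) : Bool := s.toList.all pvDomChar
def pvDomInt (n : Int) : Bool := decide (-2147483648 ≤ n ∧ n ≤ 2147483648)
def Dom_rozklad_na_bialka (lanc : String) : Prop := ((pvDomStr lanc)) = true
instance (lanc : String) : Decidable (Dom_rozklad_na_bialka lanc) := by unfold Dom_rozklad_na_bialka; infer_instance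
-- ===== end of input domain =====

-- B replaces A's one-pass index+two-flags state machine (optimistic append, final pop) by two
-- staged passes: split at '*', drop the unterminated last segment, keep each remaining segment
-- from its first 'M' on; objective: simpler (same asymptotic cost; a timing run measured a constant-factor speedup).

-- ===== PORT A =====
-- loop body of A, over state (bialka, j, czy_bialko, czy_skonczone).
-- bialka[j] is always in range when czy_bialko is true (j = number of completed proteins),
-- so getD/set transcribe Python's bialka[j] read/assignment exactly there.
def pvStepA (st : List String × Nat × Bool × Bool) (i : Char) : List String × Nat × Bool × Bool :=
  let (bialka, j, czy_bialko, czy_skonczone) := st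
  let (bialka, j, czy_bialko, czy_skonczone) :=
    if i = '*' ∧ czy_bialko then (bialka, j + 1, false, true)
    else (bialka, j, czy_bialko, czy_skonczone)
  if czy_bialko then (bialka.set j ((bialka.getD j "") ++ i.toString), j, czy_bialko, czy_skonczone)
  else if i = 'M' then (bialka ++ ["M"], j, true, false)
  else (bialka, j, czy_bialko, czy_skonczone)

def rozklad_na_bialka (lanc : String) : List String :=
  let s := lanc.toList.foldl pvStepA ([], 0, false, true)
  if ¬ s.2.2.2 then s.1.dropLast else s.1   -- bialka.pop() iff not czy_skonczone

-- ===== PORT B =====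
-- [seg[seg.find("M"):] for seg in lanc.split("*")[:-1] if "M" in seg]
def rozklad_na_bialka_alt (lanc : String) : List String :=
  (PySem.List.slice (PySem.Chars.splitOn lanc.toList "*".toList) none (some (-1))).filterMap
    (fun seg =>
      if PySem.Chars.isIn "M".toList seg then
        some (String.ofList (PySem.List.slice seg (some (PySem.Chars.find seg "M".toList)) none))
      else none)

-- ===== PRECONDITION & SPEC =====
def Spec_rozklad_na_bialka (lanc : String) (out : List String) : Prop := out = rozklad_na_bialka_alt lanc
instance (lanc : String) (out : List String) : Decidable (Spec_rozklad_na_bialka lanc out) := by unfold Spec_rozklad_na_bialka; infer_instance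

-- ===== CLAIM (what is proved, stated in full; the proofs are below) =====
def Claim_equal_rozklad_na_bialka : Prop := ∀ (lanc : String), Dom_rozklad_na_bialka lanc → Spec_rozklad_na_bialka lanc (rozklad_na_bialka lanc)

-- ===== LEMMAS AND PROOFS =====

-- A's state machine restated with a single optional accumulator (proof intermediate).
def pvSM (st : List String × Option String) (ch : Char) : List String × Option String :=
  match st with
  | (bialka, some cur) =>
      if ch = '*' then (bialka ++ [cur], none) else (bialka, some (cur ++ ch.toString))
  | (bialka, none) =>
      if ch = 'M' then (bialka, some "M") else (bialka, none)

-- A's state as a function of the pvSM state: when a protein `p` is in progress, A's list carries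
-- it as its (optimistically appended) last element, j counts the completed proteins, and the
-- flags are (true, false); when none is in progress the flags are (false, true).
def pvMkA (done : List String) (cur : Option String) : List String × Nat × Bool × Bool :=
  match cur with
  | some p => (done ++ [p], done.length, true, false)
  | none => (done, done.length, false, true)

theorem pvStep_sim (done : List String) (cur : Option String) (c : Char) :
    pvStepA (pvMkA done cur) c = pvMkA (pvSM (done, cur) c).1 (pvSM (done, cur) c).2 := by
  cases cur with
  | none =>
      by_cases h : c = 'M' <;> simp [pvStepA, pvSM, pvMkA, h]
  | some p =>
      by_cases h : c = '*'
      · simp [pvStepA, pvSM, pvMkA, h]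
      · simp [pvStepA, pvSM, pvMkA, h, List.set_append_right]

theorem pvFold_sim (l : List Char) : ∀ (done : List String) (cur : Option String),
    l.foldl pvStepA (pvMkA done cur)
      = pvMkA (l.foldl pvSM (done, cur)).1 (l.foldl pvSM (done, cur)).2 := by
  induction l with
  | nil => intro done cur; rfl
  | cons c l ih =>
      intro done cur
      have := pvStep_sim done cur c
      simp only [List.foldl_cons, this]
      exact ih _ _

-- A equals the pvSM fold.
theorem pvA_eq_SM (lanc : String) :
    rozklad_na_bialka lanc = (lanc.toList.foldl pvSM ([], none)).1 := by
  unfold rozklad_na_bialka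
  have h := pvFold_sim lanc.toList [] none
  simp only [show (([], 0, false, true) : List String × Nat × Bool × Bool) = pvMkA [] none from rfl, h]
  cases hb : (lanc.toList.foldl pvSM ([], none)).2 <;> simp [pvMkA]

-- the pvSM fold's output, as a recursive function of the input
def pvRes : Option String → List Char → List String
  | _, [] => []
  | some p, c :: t => if c = '*' then p :: pvRes none t else pvRes (some (p ++ c.toString)) t
  | none, c :: t => if c = 'M' then pvRes (some "M") t else pvRes none t

theorem pvSM_res (l : List Char) : ∀ (done : List String) (cur : Option String),
    (l.foldl pvSM (done, cur)).1 = done ++ pvRes cur l := by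
  induction l with
  | nil => intro done cur; simp [pvRes]
  | cons c t ih =>
      intro done cur
      cases cur with
      | none =>
          by_cases h : c = 'M' <;> simp [pvSM, pvRes, h, ih]
      | some p =>
          by_cases h : c = '*' <;> simp [pvSM, pvRes, h, ih]

-- structural split at '*' (equals PySem.Chars.splitOn · ['*'])
def pvSplitCh : List Char → List (List Char)
  | [] => [[]]
  | c :: t =>
      if c = '*' then [] :: pvSplitCh t
      else
        match pvSplitCh t with
        | [] => [[c]]
        | h :: tl => (c :: h) :: tl

-- structural "keep from the first 'M' on, if any"
def pvGStruct : List Char → Option (List Char)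
  | [] => none
  | c :: t => if c = 'M' then some (c :: t) else pvGStruct t

def pvFF (ss : List (List Char)) : List String :=
  (ss.dropLast.filterMap pvGStruct).map String.ofList

theorem pvSplitCh_ne_nil (l : List Char) : pvSplitCh l ≠ [] := by
  cases l with
  | nil => simp [pvSplitCh]
  | cons c t =>
      by_cases h : c = '*'
      · simp [pvSplitCh, h]
      · simp only [pvSplitCh, h, if_false]
        cases pvSplitCh t <;> simp

theorem pvStrCons (p : String) (c : Char) (h : List Char) :
    p ++ c.toString ++ String.ofList h = p ++ String.ofList (c :: h) := by
  apply String.toList_inj.mp; simp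

theorem pvStrM (h : List Char) : "M" ++ String.ofList h = String.ofList ('M' :: h) := by
  apply String.toList_inj.mp; simp

theorem pvRes_split (l : List Char) :
    (pvRes none l = pvFF (pvSplitCh l)) ∧
    (∀ (p : String) (s0 : List Char) (ss : List (List Char)), pvSplitCh l = s0 :: ss →
      pvRes (some p) l = if ss = [] then [] else (p ++ String.ofList s0) :: pvFF ss) := by
  induction l with
  | nil =>
      constructor
      · simp [pvRes, pvSplitCh, pvFF]
      · intro p s0 ss h
        simp [pvSplitCh] at h
        simp [pvRes, h.2.symm]
  | cons c t ih =>
      obtain ⟨ihA, ihB⟩ := ih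
      obtain ⟨h0, ss0, hsp⟩ : ∃ h0 ss0, pvSplitCh t = h0 :: ss0 := by
        cases hh : pvSplitCh t with
        | nil => exact absurd hh (pvSplitCh_ne_nil t)
        | cons a b => exact ⟨a, b, rfl⟩
      constructor
      · -- pvRes none (c :: t)
        by_cases hM : c = 'M'
        · subst hM
          have hb := ihB "M" h0 ss0 hsp
          cases ss0 with
          | nil => simp [pvRes, hb, pvSplitCh, hsp, pvFF]
          | cons x y =>
              simp [pvRes, hb, pvSplitCh, hsp, pvFF, pvGStruct, pvStrM]
        · by_cases hS : c = '*'
          · subst hS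
            cases ss0 with
            | nil => simp [pvRes, ihA, pvSplitCh, hsp, pvFF, pvGStruct]
            | cons x y => simp [pvRes, ihA, pvSplitCh, hsp, pvFF, pvGStruct]
          · cases ss0 with
            | nil => simp [pvRes, hM, hS, ihA, pvSplitCh, hsp, pvFF]
            | cons x y =>
                simp [pvRes, hM, hS, ihA, pvSplitCh, hsp, pvFF]
                rw [List.filterMap_cons, List.filterMap_cons,
                  show pvGStruct (c :: h0) = pvGStruct h0 by simp [pvGStruct, hM]]
      · -- pvRes (some p)
        intro p s0 ss h
        by_cases hS : c = '*'
        · subst hS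
          simp only [pvSplitCh, hsp] at h
          obtain ⟨h1, h2⟩ := List.cons_eq_cons.mp h
          subst h1; subst h2
          simp only [pvRes, ihA, hsp]
          simp [pvFF]
        · simp only [pvSplitCh, if_neg hS, hsp] at h
          obtain ⟨h1, h2⟩ := List.cons_eq_cons.mp h
          subst h1; subst h2
          have hb := ihB (p ++ c.toString) h0 ss0 hsp
          simp only [pvRes, if_neg hS, hb, pvStrCons]

-- PySem's fuel-based splitOn at sep '*' equals the structural split pvSplitCh
def pvModHead (f : List Char → List Char) : List (List Char) → List (List Char)
  | [] => []
  | h :: t => f h :: t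

theorem pvGo (fuel : Nat) : ∀ (l cur : List Char) (acc : List (List Char)), l.length < fuel →
    PySem.Chars.splitOn.go ['*'] fuel l cur acc
      = acc.reverse ++ pvModHead (cur.reverse ++ ·) (pvSplitCh l) := by
  induction fuel with
  | zero => intro l cur acc h; omega
  | succ n ih =>
      intro l cur acc h
      cases l with
      | nil =>
          simp [PySem.Chars.splitOn.go, pvSplitCh, pvModHead]
      | cons c rest =>
          by_cases hc : c = '*'
          · subst hc
            have hp : List.isPrefixOf ['*'] ('*' :: rest) = true := by
              simp [List.isPrefixOf]
            simp only [PySem.Chars.splitOn.go, hp, if_pos, List.length_cons, List.drop_succ_cons,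
              List.drop_zero, List.length_nil]
            rw [ih rest [] _ (by simpa using Nat.lt_of_succ_lt_succ (by simpa using h))]
            simp only [pvSplitCh, List.reverse_cons, List.reverse_nil,
              List.nil_append]
            cases hpp : pvSplitCh rest with
            | nil => exact absurd hpp (pvSplitCh_ne_nil rest)
            | cons a b => simp [pvModHead]
          · have hp : List.isPrefixOf ['*'] (c :: rest) = false := by
              simp [List.isPrefixOf]; exact fun hh => hc hh.symm
            simp only [PySem.Chars.splitOn.go, hp, Bool.false_eq_true, if_false]
            rw [ih rest (c :: cur) acc (by simpa using Nat.lt_of_succ_lt_succ (by simpa using h))]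
            simp only [pvSplitCh, if_neg hc, List.reverse_cons]
            cases hpp : pvSplitCh rest with
            | nil => exact absurd hpp (pvSplitCh_ne_nil rest)
            | cons a b => simp [pvModHead]

theorem pvSplitOn_star (l : List Char) :
    PySem.Chars.splitOn l ['*'] = pvSplitCh l := by
  unfold PySem.Chars.splitOn
  rw [pvGo (l.length + 1) l [] [] (by omega)]
  cases hpp : pvSplitCh l with
  | nil => exact absurd hpp (pvSplitCh_ne_nil l)
  | cons a b => simp [pvModHead]

-- find.go at a shifted start index
theorem pvFindGoShift (t : List Char) : ∀ k : Nat,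
    PySem.Chars.find.go ['M'] t k
      = if PySem.Chars.find.go ['M'] t 0 = -1 then -1
        else (k : Int) + PySem.Chars.find.go ['M'] t 0 := by
  induction t with
  | nil => intro k; simp [PySem.Chars.find.go]
  | cons c t ih =>
      intro k
      by_cases hc : c = 'M'
      · subst hc
        have hp : List.isPrefixOf ['M'] ('M' :: t) = true := by simp [List.isPrefixOf]
        simp [PySem.Chars.find.go, hp]
      · have hp : List.isPrefixOf ['M'] (c :: t) = false := by
          simp [List.isPrefixOf]; exact fun hh => hc hh.symm
        simp only [PySem.Chars.find.go, hp, Bool.false_eq_true, if_false]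
        rw [ih (k + 1), ih 1]
        by_cases h0 : PySem.Chars.find.go ['M'] t 0 = -1
        · simp [h0]
        · have hge : -1 ≤ PySem.Chars.find.go ['M'] t 0 := by
            have := PySem.Chars.neg_one_le_find t ['M']
            simpa [PySem.Chars.find] using this
          simp only [h0, if_false]
          split
          · omega
          · push_cast; ring

-- the B-side comprehension body equals the structural pvGStruct
theorem pvGfind (seg : List Char) :
    (if PySem.Chars.isIn ['M'] seg then
        some (String.ofList (PySem.List.slice seg (some (PySem.Chars.find seg ['M'])) none))
      else none)
      = (pvGStruct seg).map String.ofList := by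
  induction seg with
  | nil => simp [PySem.Chars.isIn, PySem.Chars.find, PySem.Chars.find.go, pvGStruct]
  | cons c t ih =>
      by_cases hc : c = 'M'
      · subst hc
        have hp : List.isPrefixOf ['M'] ('M' :: t) = true := by simp [List.isPrefixOf]
        have hf : PySem.Chars.find ('M' :: t) ['M'] = 0 := by
          simp [PySem.Chars.find, PySem.Chars.find.go, hp]
        simp [PySem.Chars.isIn, hf, pvGStruct, PySem.List.slice_from (xs := 'M' :: t) (a := 0) le_rfl]
      · have hp : List.isPrefixOf ['M'] (c :: t) = false := by
          simp [List.isPrefixOf]; exact fun hh => hc hh.symm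
        have hf : PySem.Chars.find (c :: t) ['M']
            = if PySem.Chars.find t ['M'] = -1 then -1 else 1 + PySem.Chars.find t ['M'] := by
          simp only [PySem.Chars.find, PySem.Chars.find.go, hp, Bool.false_eq_true, if_false]
          simpa using pvFindGoShift t 1
        by_cases h0 : PySem.Chars.find t ['M'] = -1
        · -- 'M' not in t: both sides none
          have : PySem.Chars.isIn ['M'] (c :: t) = false := by
            simp [PySem.Chars.isIn, hf, h0]
          have ht : PySem.Chars.isIn ['M'] t = false := by simp [PySem.Chars.isIn, h0]
          rw [ht] at ih
          simp only [this, Bool.false_eq_true, if_false]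
          simp only [Bool.false_eq_true, if_false] at ih
          simp [pvGStruct, hc, ← ih]
        · -- 'M' in t at index ft ≥ 0
          have hnn : 0 ≤ PySem.Chars.find t ['M'] := by
            have := PySem.Chars.neg_one_le_find t ['M']
            omega
          have hIn : PySem.Chars.isIn ['M'] (c :: t) = true := by
            simp [PySem.Chars.isIn, hf, h0]; omega
          have htIn : PySem.Chars.isIn ['M'] t = true := by
            simp [PySem.Chars.isIn, h0]
          simp only [htIn, if_true] at ih
          simp only [hIn, if_true, hf, if_neg h0]
          rw [PySem.List.slice_from (xs := c :: t)
                (a := 1 + PySem.Chars.find t ['M']) (by omega)]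
          rw [PySem.List.slice_from t hnn] at ih
          have harg : ((1 : Int) + PySem.Chars.find t ['M']).toNat
              = (PySem.Chars.find t ['M']).toNat + 1 := by omega
          rw [harg, List.drop_succ_cons,
            show pvGStruct (c :: t) = pvGStruct t by simp [pvGStruct, hc]]
          exact ih

theorem rozklad_na_bialka_spec0 (lanc : String) :
    rozklad_na_bialka lanc = rozklad_na_bialka_alt lanc := by
  rw [pvA_eq_SM, pvSM_res lanc.toList [] none, List.nil_append,
    (pvRes_split lanc.toList).1]
  unfold rozklad_na_bialka_alt
  rw [show ("*" : String).toList = ['*'] from rfl, pvSplitOn_star]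
  rw [show PySem.List.slice (pvSplitCh lanc.toList) none (some (-1))
      = (pvSplitCh lanc.toList).dropLast by
    simp [PySem.List.slice, List.dropLast_eq_take]]
  unfold pvFF
  rw [List.map_filterMap]
  apply List.filterMap_congr
  intro seg _
  rw [show ("M" : String).toList = ['M'] from rfl]
  exact (pvGfind seg).symm

-- ===== VERDICT (by name: the statement is the Claim_ definition above) =====
theorem rozklad_na_bialka_spec : Claim_equal_rozklad_na_bialka := by
  intro lanc _
  exact rozklad_na_bialka_spec0 lanc
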